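-- pv_equiv track=rewrite | github.com/4luqard/polymer-performance-prediction | extract_features.py | num_rings
-- ===== SOURCE A (Python) =====
-- def num_rings(smiles: str) -> int:
--     """
--     Count the number of rings in a SMILES string.
--
--     In SMILES, rings are denoted by:
--     - Single digits 1-9 (each pair forms a ring)
--     - Percent notation %10, %11, etc. for rings > 9
--
--     Args:
--         smiles: SMILES string representation
--
--     Returns:
--         Number of rings in the structure
--     """
--     if not smiles:
--         return 0
--
--     ring_markers = {}
--     ring_count = 0
--     i = 0
--
--     while i < len(smiles):
--         char = smiles[i]
--
--         # Check for single digit ring markers (1-9)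
--         if char.isdigit() and char != '0':
--             if char in ring_markers:
--                 # Found closing marker - ring is complete
--                 ring_count += 1
--                 del ring_markers[char]
--             else:
--                 # Found opening marker
--                 ring_markers[char] = i
--             i += 1
--
--         # Check for percent notation (%10, %11, etc.)
--         elif char == '%' and i + 2 < len(smiles):
--             # Try to parse two-digit number after %
--             if smiles[i+1].isdigit() and smiles[i+2].isdigit():
--                 marker = '%' + smiles[i+1:i+3]
--                 if marker in ring_markers:
--                     # Found closing marker - ring is complete
--                     ring_count += 1
--                     del ring_markers[marker]
--                 else:
--                     # Found opening marker
--                     ring_markers[marker] = i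
--                 i += 3
--             else:
--                 i += 1
--         else:
--             i += 1
--
--     # Count any unclosed rings (in incomplete SMILES)
--     ring_count += len(ring_markers)
--
--     return ring_count
-- ===== SOURCE B (Python) =====
-- def num_rings(smiles: str) -> int:
--     # Collect every ring-marker token in one scan, then count multiplicities:
--     # each marker that occurs c times contributes ceil(c/2) rings
--     # (c // 2 closed pairs plus one unclosed leftover when c is odd).
--     tokens = []
--     i = 0
--     n = len(smiles)
--     while i < n:
--         ch = smiles[i]
--         if ch.isdigit() and ch != '0':
--             tokens.append(ch)
--             i += 1
--         elif ch == '%' and i + 2 < n and smiles[i + 1].isdigit() and smiles[i + 2].isdigit():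
--             tokens.append(smiles[i:i + 3])
--             i += 3
--         else:
--             i += 1
--     counts = {}
--     for t in tokens:
--         counts[t] = counts.get(t, 0) + 1
--     return sum((c + 1) // 2 for c in counts.values())
-- ===== Notes on version B (the rewrite author's own statement) =====
-- stated objective: simpler
-- what changed: A maintains a toggled open-marker dict with a running closure count; B collects all ring-marker tokens in one scan, counts their multiplicities in a dict, and returns the closed form sum of ceil(c/2) over the counts.
import Mathlib
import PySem

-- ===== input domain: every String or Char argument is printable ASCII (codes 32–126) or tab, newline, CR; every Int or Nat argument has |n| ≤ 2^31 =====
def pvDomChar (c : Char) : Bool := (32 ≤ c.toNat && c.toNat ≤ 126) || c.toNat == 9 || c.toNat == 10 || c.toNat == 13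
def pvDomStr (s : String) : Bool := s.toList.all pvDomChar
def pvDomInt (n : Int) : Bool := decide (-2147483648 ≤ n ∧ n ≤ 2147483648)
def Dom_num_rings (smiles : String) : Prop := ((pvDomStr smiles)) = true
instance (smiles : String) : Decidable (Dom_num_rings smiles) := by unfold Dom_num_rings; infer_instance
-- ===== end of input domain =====

-- B replaces A's toggled-presence dict and running count by one token list, a
-- multiplicity count and the closed form sum of ceil(c/2) (objective: simpler).

-- ===== PORT A =====
-- while loop of A: index i, dict of open markers (keys as char lists), running count
def numRingsLoopA : List Char → Int → PySem.Dict (List Char) Int → Int → Int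
  | [], _, markers, count => count + (markers.size : Int)
  | ch :: rest, i, markers, count =>
    if PySem.Chars.isdigit ch && !(ch == '0') then
      if markers.contains [ch] then
        numRingsLoopA rest (i + 1) (markers.erase [ch]) (count + 1)
      else
        numRingsLoopA rest (i + 1) (markers.insert [ch] i) count
    else if ch == '%' then
      -- 'i + 2 < len(smiles)' is exactly 'rest has at least two characters'
      match _h : rest with
      | d1 :: d2 :: rest2 =>
        if PySem.Chars.isdigit d1 && PySem.Chars.isdigit d2 then
          if markers.contains ['%', d1, d2] then
            numRingsLoopA rest2 (i + 3) (markers.erase ['%', d1, d2]) (count + 1)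
          else
            numRingsLoopA rest2 (i + 3) (markers.insert ['%', d1, d2] i) count
        else
          numRingsLoopA rest (i + 1) markers count
      | _ => numRingsLoopA rest (i + 1) markers count
    else
      numRingsLoopA rest (i + 1) markers count
termination_by cs _ _ _ => cs.length
decreasing_by all_goals (simp_all [List.length_cons]; try omega)

def num_rings (smiles : String) : Int :=
  if smiles.toList = [] then 0
  else numRingsLoopA smiles.toList 0 PySem.Dict.empty 0

-- ===== PORT B =====
-- phase 1 of B: collect every ring-marker token in one scan
def ringTokens : List Char → List (List Char)
  | [] => []
  | ch :: rest =>
    if PySem.Chars.isdigit ch && !(ch == '0') then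
      [ch] :: ringTokens rest
    else
      match _h : rest with
      | d1 :: d2 :: rest2 =>
        if ch == '%' && PySem.Chars.isdigit d1 && PySem.Chars.isdigit d2 then
          [ch, d1, d2] :: ringTokens rest2
        else ringTokens rest
      | _ => ringTokens rest
termination_by cs => cs.length
decreasing_by all_goals (simp_all [List.length_cons]; try omega)

def num_rings_alt (smiles : String) : Int :=
  let tokens := ringTokens smiles.toList
  let counts := tokens.foldl (fun d t => d.insert t (d.getD t 0 + 1)) PySem.Dict.empty
  (counts.values.map (fun c => PySem.Int.floordiv (c + 1) 2)).sum

-- ===== PRECONDITION & SPEC =====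
def Spec_num_rings (smiles : String) (out : Int) : Prop := out = num_rings_alt smiles
instance (smiles : String) (out : Int) : Decidable (Spec_num_rings smiles out) := by unfold Spec_num_rings; infer_instance

-- ===== CLAIM (what is proved, stated in full; the proofs are below) =====
def Claim_equal_num_rings : Prop := ∀ (smiles : String), Dom_num_rings smiles → Spec_num_rings smiles (num_rings smiles)

-- ===== LEMMAS AND PROOFS =====

-- abstraction of A's loop: only the token stream and the set of open marker keys matter
def runToggle : List (List Char) → List (List Char) → Int
  | [], s => (s.length : Int)
  | t :: ts, s =>
    if t ∈ s then 1 + runToggle ts (s.filter (fun k => !(k == t)))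
    else runToggle ts (s ++ [t])

-- per-key weight: a marker seen c times contributes c/2 rings if currently open, else ceil(c/2)
def fKey (k : List Char) (ts : List (List Char)) (s : List (List Char)) : ℕ :=
  if k ∈ s then ts.count k / 2 else (ts.count k + 1) / 2

theorem keys_erase' (d : PySem.Dict (List Char) Int) (t : List Char) :
    (d.erase t).keys = d.keys.filter (fun k => !(k == t)) := by
  simp [PySem.Dict.erase, PySem.Dict.keys, List.filter_map]
  rfl

theorem loopA_step_close (d : PySem.Dict (List Char) Int) (t : List Char)
    (hc : d.contains t = true) (ts : List (List Char)) :
    runToggle (t :: ts) d.keys = 1 + runToggle ts (d.erase t).keys := by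
  rw [runToggle, if_pos ((PySem.Dict.contains_iff_mem_keys d t).mp hc), keys_erase']

theorem loopA_step_open (d : PySem.Dict (List Char) Int) (t : List Char) (v : Int)
    (hc : ¬ d.contains t = true) (ts : List (List Char)) :
    runToggle (t :: ts) d.keys = runToggle ts (d.insert t v).keys := by
  rw [runToggle,
    if_neg (fun hmem => hc ((PySem.Dict.contains_iff_mem_keys d t).mpr hmem)),
    PySem.Dict.keys_insert_of_not_contains d v (Bool.not_eq_true _ |>.mp hc)]

theorem erase_keys_nodup (d : PySem.Dict (List Char) Int) (t : List Char)
    (hnd : d.keys.Nodup) : (d.erase t).keys.Nodup := by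
  rw [keys_erase']; exact hnd.filter _

theorem loopA_eq_runToggle :
    ∀ (n : ℕ) (cs : List Char), cs.length ≤ n →
    ∀ (i : Int) (d : PySem.Dict (List Char) Int) (c : Int), d.keys.Nodup →
    numRingsLoopA cs i d c = c + runToggle (ringTokens cs) d.keys := by
  intro n
  induction n with
  | zero =>
    intro cs hcs i d c hnd
    have h : cs = [] := List.length_eq_zero_iff.mp (Nat.le_zero.mp hcs)
    subst h
    simp [numRingsLoopA, ringTokens, runToggle, PySem.Dict.size, PySem.Dict.keys]
  | succ n ih =>
    intro cs hcs i d c hnd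
    have step_digit : ∀ (ch : Char) (rest : List Char), rest.length ≤ n →
        (PySem.Chars.isdigit ch && !(ch == '0')) = true →
        (if d.contains [ch] then numRingsLoopA rest (i + 1) (d.erase [ch]) (c + 1)
         else numRingsLoopA rest (i + 1) (d.insert [ch] i) c)
        = c + runToggle ([ch] :: ringTokens rest) d.keys := by
      intro ch rest hrest _
      by_cases hc : d.contains [ch] = true
      · rw [if_pos hc, loopA_step_close d [ch] hc,
          ih rest hrest _ _ _ (erase_keys_nodup d [ch] hnd)]
        ring
      · rw [if_neg hc, loopA_step_open d [ch] i hc,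
          ih rest hrest _ _ _ (PySem.Dict.nodup_keys_insert d [ch] i hnd)]
    match cs with
    | [] => simp [numRingsLoopA, ringTokens, runToggle, PySem.Dict.size, PySem.Dict.keys]
    | [ch] =>
      have hrest : ([] : List Char).length ≤ n := by simp
      rw [numRingsLoopA]
      case x_5 => intro e1 e2 erest h; cases h
      simp only [ringTokens]
      by_cases hdig : (PySem.Chars.isdigit ch && !(ch == '0')) = true
      · rw [if_pos hdig, if_pos hdig, step_digit ch [] hrest hdig]
        simp [ringTokens]
      · rw [if_neg hdig, if_neg hdig]
        split <;> rw [ih [] hrest _ _ _ hnd] <;> simp [ringTokens]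
    | [ch, d1] =>
      have hrest : [d1].length ≤ n := by simp at hcs ⊢; omega
      rw [numRingsLoopA]
      case x_5 => intro e1 e2 erest h; cases h
      simp only [ringTokens]
      by_cases hdig : (PySem.Chars.isdigit ch && !(ch == '0')) = true
      · rw [if_pos hdig, if_pos hdig, step_digit ch [d1] hrest hdig]
        simp [ringTokens]
      · rw [if_neg hdig, if_neg hdig]
        split <;> rw [ih [d1] hrest _ _ _ hnd] <;> simp [ringTokens]
    | ch :: d1 :: d2 :: rest2 =>
      have hrest : (d1 :: d2 :: rest2).length ≤ n := by simp at hcs ⊢; omega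
      have hrest2 : rest2.length ≤ n := by simp at hcs ⊢; omega
      conv_lhs => rw [numRingsLoopA]
      conv_rhs => rw [ringTokens]
      by_cases hdig : (PySem.Chars.isdigit ch && !(ch == '0')) = true
      · rw [if_pos hdig, if_pos hdig, step_digit ch (d1 :: d2 :: rest2) hrest hdig]
      · rw [if_neg hdig, if_neg hdig]
        by_cases hpc : (ch == '%') = true
        · rw [if_pos hpc]
          by_cases hdd : (PySem.Chars.isdigit d1 && PySem.Chars.isdigit d2) = true
          · have hcond : (ch == '%' && PySem.Chars.isdigit d1 && PySem.Chars.isdigit d2) = true := by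
              simp_all
            rw [if_pos hdd, if_pos hcond]
            have hch : ch = '%' := by simpa using hpc
            subst hch
            by_cases hc : d.contains ['%', d1, d2] = true
            · rw [if_pos hc, loopA_step_close d ['%', d1, d2] hc,
                ih rest2 hrest2 _ _ _ (erase_keys_nodup d ['%', d1, d2] hnd)]
              ring
            · rw [if_neg hc, loopA_step_open d ['%', d1, d2] i hc,
                ih rest2 hrest2 _ _ _ (PySem.Dict.nodup_keys_insert d ['%', d1, d2] i hnd)]
          · rw [if_neg hdd, if_neg (by simp_all), ih _ hrest _ _ _ hnd]
        · rw [if_neg hpc, if_neg (by simp_all), ih _ hrest _ _ _ hnd]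

theorem runToggle_eq_sum :
    ∀ (ts : List (List Char)) (s : List (List Char)) (U : Finset (List Char)),
    s.Nodup → ts.toFinset ⊆ U →
    runToggle ts s = (s.length : Int) + ((∑ k ∈ U, fKey k ts s : ℕ) : Int) := by
  intro ts
  induction ts with
  | nil =>
    intro s U hnd _
    have : ∀ k ∈ U, fKey k [] s = 0 := by
      intro k _; simp [fKey, List.count_nil]
    rw [Finset.sum_congr rfl this]
    simp [runToggle]
  | cons t ts ih =>
    intro s U hnd hsub
    have htU : t ∈ U := hsub (by simp)
    have hsubts : ts.toFinset ⊆ U := by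
      intro k hk; exact hsub (by simp [List.mem_toFinset] at hk ⊢; exact Or.inr hk)
    by_cases ht : t ∈ s
    · -- closing or re-toggling: every key's weight is unchanged
      rw [runToggle, if_pos ht]
      have hfil : (s.filter (fun k => !(k == t))).Nodup := hnd.filter _
      rw [ih (s.filter (fun k => !(k == t))) U hfil hsubts]
      have hlen : (s.filter (fun k => !(k == t))).length + 1 = s.length := by
        have : s.filter (fun k => !(k == t)) = s.erase t := by
          rw [List.Nodup.erase_eq_filter hnd]
          apply List.filter_congr; intro k _; simp [bne]
        rw [this, List.length_erase_of_mem ht]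
        have := List.length_pos_of_mem ht
        omega
      have hterm : ∀ k ∈ U, fKey k ts (s.filter (fun j => !(j == t))) = fKey k (t :: ts) s := by
        intro k _
        by_cases hk : k = t
        · subst hk
          simp [fKey, ht, List.count_cons_self, List.mem_filter]
        · have htk : ¬ t = k := fun h => hk h.symm
          simp [fKey, List.mem_filter, hk, htk, and_comm]
      rw [Finset.sum_congr rfl hterm]
      push_cast
      omega
    · -- opening: the weight of t alone grows by one
      rw [runToggle, if_neg ht]
      have hap : (s ++ [t]).Nodup := by
        simp [List.nodup_append, hnd]
        intro a ha h
        exact ht (h ▸ ha)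
      rw [ih (s ++ [t]) U hap hsubts]
      have hlen : (s ++ [t]).length = s.length + 1 := by simp
      have hterm : ∀ k ∈ U.erase t, fKey k ts (s ++ [t]) = fKey k (t :: ts) s := by
        intro k hk
        have hkt : k ≠ t := (Finset.mem_erase.mp hk).1
        have htk : ¬ t = k := fun h => hkt h.symm
        simp [fKey, List.mem_append, hkt, htk]
      have htv : fKey t ts (s ++ [t]) + 1 = fKey t (t :: ts) s := by
        simp [fKey, ht, List.count_cons_self]
        omega
      rw [← Finset.add_sum_erase U _ htU, ← Finset.add_sum_erase U _ htU]
      rw [Finset.sum_congr rfl hterm]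
      push_cast
      omega

theorem alt_eq_sum (tokens : List (List Char)) :
    ((tokens.foldl (fun d t => d.insert t (d.getD t 0 + 1)) PySem.Dict.empty).values.map
      (fun c => PySem.Int.floordiv (c + 1) 2)).sum
    = ((∑ k ∈ tokens.toFinset, (tokens.count k + 1) / 2 : ℕ) : Int) := by
  rw [PySem.Dict.foldl_insert_getD_add_one_eq_counter]
  rw [PySem.Dict.values_eq_map_keys _ (PySem.Dict.nodup_keys_counter tokens) 0]
  rw [PySem.Dict.keys_counter]
  have h1 : ∀ k, PySem.Int.floordiv ((PySem.Dict.counter tokens).getD k 0 + 1) 2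
      = ((tokens.count k + 1) / 2 : ℕ) := by
    intro k
    rw [PySem.Dict.getD_counter]
    have : ((tokens.count k : Int) + 1) = ((tokens.count k + 1 : ℕ) : Int) := by push_cast; ring
    rw [this]
    exact_mod_cast PySem.Int.floordiv_natCast (tokens.count k + 1) 2
  rw [List.map_map]
  have h2 : ((PySem.Set.ofList tokens).map
      ((fun c => PySem.Int.floordiv (c + 1) 2) ∘ fun k => (PySem.Dict.counter tokens).getD k 0))
      = (PySem.Set.ofList tokens).map (fun k => (((tokens.count k + 1) / 2 : ℕ) : Int)) := by
    apply List.map_congr_left; intro k _; exact h1 k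
  rw [h2]
  have hnd : (PySem.Set.ofList tokens).Nodup := PySem.Set.nodup_ofList tokens
  have hfs : (PySem.Set.ofList tokens).toFinset = tokens.toFinset := by
    ext k; simp [List.mem_toFinset, PySem.Set.mem_ofList]
  rw [← hfs, ← List.sum_toFinset _ hnd]
  push_cast
  rfl

-- ===== VERDICT (by name: the statement is the Claim_ definition above) =====
theorem num_rings_spec : Claim_equal_num_rings := by
  intro smiles _
  unfold Spec_num_rings num_rings num_rings_alt
  by_cases h : smiles.toList = []
  · simp [h, ringTokens, PySem.Dict.empty, PySem.Dict.values]
  · rw [if_neg h]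
    rw [loopA_eq_runToggle smiles.toList.length smiles.toList le_rfl 0 PySem.Dict.empty 0
      (by simp [PySem.Dict.keys, PySem.Dict.empty])]
    rw [runToggle_eq_sum (ringTokens smiles.toList) PySem.Dict.empty.keys
      (ringTokens smiles.toList).toFinset (by simp [PySem.Dict.keys, PySem.Dict.empty])
      subset_rfl]
    rw [alt_eq_sum]
    simp [PySem.Dict.keys, PySem.Dict.empty, fKey]
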